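-- pv_equiv track=rewrite | github.com/drummerjolev/time-lock-puzzle | timelockpuzzle/algorithms/fast_exponentiation.py | successive_squares
-- ===== SOURCE A (Python) =====
-- def successive_squares(base: int, mod: int, length: int) -> [int]:
--     table = [base % mod]
--     prev = base % mod
--     for n in range(1, length):
--         squared = prev**2 % mod
--         table.append(squared)
--         prev = squared
--     return table
-- ===== SOURCE B (Python) =====
-- def successive_squares(base: int, mod: int, length: int) -> [int]:
--     # Detect the cycle of the squaring map with a hash map of first occurrences,
--     # then fill the remainder of the table by tiling the detected cycle.
--     first = base % mod
--     table = [first]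
--     seen = {first: 0}
--     while len(table) < length:
--         nxt = table[-1] * table[-1] % mod
--         start = seen.get(nxt)
--         if start is not None:
--             cycle = table[start:]
--             need = length - len(table)
--             return table + (cycle * (need // len(cycle) + 1))[:need]
--         seen[nxt] = len(table)
--         table.append(nxt)
--     return table
-- ===== Notes on version B (the rewrite author's own statement) =====
-- stated objective: faster
-- what changed: Replaces A's unconditional square-the-previous loop with cycle detection (a hash map of first occurrences of each value) followed by closed-form tiling of the detected cycle to fill the rest of the table.
import Mathlib
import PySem

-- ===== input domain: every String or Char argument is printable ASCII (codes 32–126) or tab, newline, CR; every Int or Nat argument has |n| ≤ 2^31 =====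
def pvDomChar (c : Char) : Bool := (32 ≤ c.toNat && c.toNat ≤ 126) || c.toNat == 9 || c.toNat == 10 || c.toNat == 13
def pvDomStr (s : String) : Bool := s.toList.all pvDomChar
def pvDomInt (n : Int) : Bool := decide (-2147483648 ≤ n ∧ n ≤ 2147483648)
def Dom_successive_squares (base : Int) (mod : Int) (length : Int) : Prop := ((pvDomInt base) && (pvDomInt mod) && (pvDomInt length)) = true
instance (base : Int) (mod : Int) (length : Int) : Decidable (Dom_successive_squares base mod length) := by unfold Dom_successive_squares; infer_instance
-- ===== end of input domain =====

-- B replaces A's unconditional squaring loop by cycle detection (hash map of first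
-- occurrences) plus closed-form tiling of the detected cycle (objective: faster; measured).

-- ===== PORT A =====
-- table = [base % mod]; prev = base % mod; for n in range(1, length): squared = prev**2 % mod; append; prev = squared
def successive_squares (base : Int) (mod : Int) (length : Int) : List Int :=
  let b := PySem.Int.mod base mod
  -- table.append is ported as cons onto the reversed table (reversed once at the end)
  let r := (PySem.List.pyRange 1 length 1).foldl
    (fun (st : List Int × Int) _ =>
      let squared := PySem.Int.mod (st.2 ^ 2) mod
      (squared :: st.1, squared)) ([b], b)
  r.1.reverse

-- ===== PORT B =====
-- the while loop: fuel = length - len(table) (each iteration appends exactly one element,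
-- so the fuel counter r IS the Python value length - len(table) at every entry)
def pvSeenLoop (m : Int) : Nat → List Int → PySem.Dict Int Int → List Int
  | 0, table, _ => table
  | r + 1, table, seen =>
      let lastv := PySem.List.pyGetD table (-1) 0           -- table[-1]
      let nxt := PySem.Int.mod (lastv * lastv) m
      match PySem.Dict.get? seen nxt with
      | some start =>
          let cycle := PySem.List.slice table (some start) none   -- table[start:]
          let need : Int := (r : Int) + 1                         -- length - len(table)
          -- (cycle * (need // len(cycle) + 1))[:need]
          table ++ PySem.List.slice
            (PySem.List.pyRepeat cycle (PySem.Int.floordiv need (cycle.length : Int) + 1))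
            none (some need)
      | none => pvSeenLoop m r (table ++ [nxt]) (PySem.Dict.insert seen nxt (table.length : Int))

def successive_squares_alt (base : Int) (mod : Int) (length : Int) : List Int :=
  let first := PySem.Int.mod base mod
  pvSeenLoop mod (length - 1).toNat [first] (PySem.Dict.insert PySem.Dict.empty first 0)

-- ===== PRECONDITION & SPEC =====
-- Python raises ZeroDivisionError on '%' with modulus 0.
def Pre_successive_squares (base : Int) (mod : Int) (length : Int) : Prop := mod ≠ 0
instance (base : Int) (mod : Int) (length : Int) : Decidable (Pre_successive_squares base mod length) := by unfold Pre_successive_squares; infer_instance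
def pvWitness_successive_squares : Int × Int × Int := (3, 7, 5)

def Spec_successive_squares (base : Int) (mod : Int) (length : Int) (out : List Int) : Prop := out = successive_squares_alt base mod length
instance (base : Int) (mod : Int) (length : Int) (out : List Int) : Decidable (Spec_successive_squares base mod length out) := by unfold Spec_successive_squares; infer_instance

-- ===== CLAIM (what is proved, stated in full; the proofs are below) =====
def Claim_equal_successive_squares : Prop := ∀ (base : Int) (mod : Int) (length : Int), Dom_successive_squares base mod length → Pre_successive_squares base mod length → Spec_successive_squares base mod length (successive_squares base mod length)

-- ===== LEMMAS AND PROOFS =====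

-- the squaring chain: entry k of the table
def pvC (x m : Int) (k : Nat) : Int := PySem.Int.mod (x ^ (2 ^ k)) m

-- its prefix of length t
def pvT (x m : Int) (t : Nat) : List Int := (List.range t).map (pvC x m)

-- a ≡ mod a m (difference is a multiple of m), from floordiv_mul_add_mod
theorem pv_dvd_sub_mod (a m : Int) : m ∣ a - PySem.Int.mod a m := by
  have h := PySem.Int.floordiv_mul_add_mod a m
  exact ⟨PySem.Int.floordiv a m, by linarith⟩

-- Python mod respects congruence (m ≠ 0)
theorem pv_mod_congr (a b m : Int) (hm : m ≠ 0) (h : m ∣ a - b) :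
    PySem.Int.mod a m = PySem.Int.mod b m := by
  have hd : m ∣ PySem.Int.mod a m - PySem.Int.mod b m := by
    have h1 := pv_dvd_sub_mod a m
    have h2 := pv_dvd_sub_mod b m
    have : PySem.Int.mod a m - PySem.Int.mod b m =
        (a - b) - (a - PySem.Int.mod a m) + (b - PySem.Int.mod b m) := by ring
    rw [this]
    exact dvd_add (dvd_sub h h1) h2
  have habs : |PySem.Int.mod a m - PySem.Int.mod b m| < |m| := by
    rcases lt_or_gt_of_ne hm with hneg | hpos
    · have b1 := PySem.Int.mod_neg_bounds a hneg
      have b2 := PySem.Int.mod_neg_bounds b hneg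
      rw [abs_of_neg hneg]
      rcases abs_cases (PySem.Int.mod a m - PySem.Int.mod b m) with ⟨he, _⟩ | ⟨he, _⟩ <;> omega
    · have a1 := PySem.Int.mod_nonneg a hpos
      have a2 := PySem.Int.mod_lt a hpos
      have b1 := PySem.Int.mod_nonneg b hpos
      have b2 := PySem.Int.mod_lt b hpos
      rw [abs_of_pos hpos]
      rcases abs_cases (PySem.Int.mod a m - PySem.Int.mod b m) with ⟨he, _⟩ | ⟨he, _⟩ <;> omega
  have hd' : |m| ∣ PySem.Int.mod a m - PySem.Int.mod b m := (abs_dvd _ _).mpr hd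
  have := Int.eq_zero_of_abs_lt_dvd hd' habs
  omega

-- squaring the k-th entry gives the (k+1)-th entry
theorem pv_square_step (x m : Int) (hm : m ≠ 0) (k : Nat) :
    PySem.Int.mod ((PySem.Int.mod (x ^ (2 ^ k)) m) ^ 2) m = PySem.Int.mod (x ^ (2 ^ (k + 1))) m := by
  apply pv_mod_congr _ _ _ hm
  have h := pv_dvd_sub_mod (x ^ (2 ^ k)) m
  rcases h with ⟨c, hc⟩
  refine ⟨-(2 * x ^ (2 ^ k) * c - m * c ^ 2), ?_⟩
  have hp : x ^ 2 ^ (k + 1) = (x ^ 2 ^ k) ^ 2 := by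
    rw [← pow_mul]; ring_nf
  have hmod : PySem.Int.mod (x ^ (2 ^ k)) m = x ^ (2 ^ k) - m * c := by linarith
  rw [hmod, hp]; ring

theorem pvC_step (x m : Int) (hm : m ≠ 0) (k : Nat) :
    pvC x m (k + 1) = PySem.Int.mod (pvC x m k * pvC x m k) m := by
  unfold pvC
  rw [show PySem.Int.mod (x ^ 2 ^ k) m * PySem.Int.mod (x ^ 2 ^ k) m
        = (PySem.Int.mod (x ^ 2 ^ k) m) ^ 2 by ring,
      pv_square_step x m hm k]

-- loop invariant for A's fold over List.range n
theorem pv_loop (x m : Int) (hm : m ≠ 0) (n : Nat) :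
    (List.range n).foldl
      (fun (st : List Int × Int) (_ : Nat) =>
        let squared := PySem.Int.mod (st.2 ^ 2) m
        (squared :: st.1, squared))
      ([PySem.Int.mod x m], PySem.Int.mod x m)
    = ((PySem.Int.mod x m :: (List.range n).map (fun k => PySem.Int.mod (x ^ (2 ^ (k + 1))) m)).reverse,
       PySem.Int.mod (x ^ (2 ^ n)) m) := by
  induction n with
  | zero => simp
  | succ n ih =>
    rw [List.range_succ, List.foldl_append, ih, List.map_append]
    simp only [List.foldl_cons, List.foldl_nil]
    rw [pv_square_step x m hm n]
    simp

theorem pvT_length (x m : Int) (t : Nat) : (pvT x m t).length = t := by simp [pvT]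

-- table[-1] of the chain prefix
theorem pv_last (x m : Int) (t : Nat) (ht : 1 ≤ t) :
    PySem.List.pyGetD (pvT x m t) (-1) 0 = pvC x m (t - 1) := by
  have hl : (pvT x m t).length = t := pvT_length x m t
  simp only [PySem.List.pyGetD, PySem.List.pyGet?, PySem.List.pyIdx?, hl]
  rw [if_neg (by omega), if_pos (by omega : -(t : Int) ≤ -1)]
  simp only [Option.bind_some]
  simp only [pvT]
  rw [show ((- -1 : Int)).toNat = 1 from rfl, List.getElem?_map,
      List.getElem?_range (by omega : t - 1 < t)]
  rfl

-- equal entries shift: c (s + k) = c (t + k)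
theorem pv_shift (x m : Int) (hm : m ≠ 0) (s t : Nat) (h : pvC x m s = pvC x m t) :
    ∀ k, pvC x m (s + k) = pvC x m (t + k) := by
  intro k
  induction k with
  | zero => simpa using h
  | succ k ih =>
    rw [show s + (k + 1) = (s + k) + 1 by omega, show t + (k + 1) = (t + k) + 1 by omega,
        pvC_step x m hm, pvC_step x m hm, ih]

-- periodicity: entries beyond t repeat the cycle [s, t)
theorem pv_reduce (x m : Int) (hm : m ≠ 0) (s t : Nat) (hst : s < t)
    (h : pvC x m s = pvC x m t) :
    ∀ j, pvC x m (t + j) = pvC x m (s + j % (t - s)) := by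
  intro j
  induction j using Nat.strong_induction_on with
  | _ j ih =>
    by_cases hj : j < t - s
    · rw [Nat.mod_eq_of_lt hj]
      exact (pv_shift x m hm s t h j).symm
    · have hp : 0 < t - s := by omega
      have hj' : j - (t - s) < j := by omega
      have e1 : s + j = t + (j - (t - s)) := by omega
      calc pvC x m (t + j) = pvC x m (s + j) := (pv_shift x m hm s t h j).symm
        _ = pvC x m (t + (j - (t - s))) := by rw [e1]
        _ = pvC x m (s + (j - (t - s)) % (t - s)) := ih _ hj'
        _ = pvC x m (s + j % (t - s)) := by rw [← Nat.mod_eq_sub_mod (by omega)]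

-- table[start:] of the chain prefix
theorem pv_drop (x m : Int) (s t : Nat) (hst : s ≤ t) :
    (pvT x m t).drop s = (List.range (t - s)).map (fun j => pvC x m (s + j)) := by
  apply List.ext_getElem
  · simp [pvT]
  · intro i h1 h2
    simp only [pvT, List.getElem_drop, List.getElem_map, List.getElem_range]

-- tiling: cy * q laid out entry by entry
theorem pv_tile (cy : List Int) (hp : 0 < cy.length) (q : Nat) :
    (List.replicate q cy).flatten = (List.range (q * cy.length)).map (fun j => cy.getD (j % cy.length) 0) := by
  induction q with
  | zero => simp
  | succ q ih =>
    rw [List.replicate_succ, List.flatten_cons, ih,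
        show (q + 1) * cy.length = cy.length + q * cy.length by ring, List.range_add,
        List.map_append]
    congr 1
    · apply List.ext_getElem
      · simp
      · intro i h1 h2
        simp only [List.getElem_map, List.getElem_range]
        rw [Nat.mod_eq_of_lt (by simpa using h2)]
        exact (List.getD_eq_getElem cy 0 h1).symm
    · rw [List.map_map]
      apply List.map_congr_left
      intro j _
      simp [Nat.add_mod_left]

-- B's loop computes the chain prefix
theorem pv_loopB (x m : Int) (hm : m ≠ 0) :
    ∀ (r t : Nat) (seen : PySem.Dict Int Int), 1 ≤ t →
    (∀ i j : Nat, i < t → j < t → pvC x m i = pvC x m j → i = j) →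
    (∀ (v w : Int), seen.get? v = some w ↔ ∃ j : Nat, j < t ∧ w = (j : Int) ∧ pvC x m j = v) →
    pvSeenLoop m r (pvT x m t) seen = pvT x m (t + r) := by
  intro r
  induction r with
  | zero => intro t seen _ _ _; simp [pvSeenLoop]
  | succ r ih =>
    intro t seen ht hinj hspec
    rw [pvSeenLoop]
    simp only
    rw [pv_last x m t ht]
    rw [show PySem.Int.mod (pvC x m (t-1) * pvC x m (t-1)) m = pvC x m t by
          rw [← pvC_step x m hm (t-1)]; congr 1; omega]
    cases hg : seen.get? (pvC x m t) with
    | none =>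
        dsimp only
        have hfresh : ∀ j : Nat, j < t → pvC x m j ≠ pvC x m t := by
          intro j hj heq
          have : seen.get? (pvC x m t) = some (j : Int) :=
            (hspec _ _).mpr ⟨j, hj, rfl, heq⟩
          rw [hg] at this; exact absurd this (by simp)
        have htab : pvT x m t ++ [pvC x m t] = pvT x m (t + 1) := by
          simp [pvT, List.range_succ]
        rw [htab, pvT_length]
        have := ih (t + 1) (seen.insert (pvC x m t) (t : Int)) (by omega)
          (by
            intro i j hi hj hij
            by_cases hit : i = t <;> by_cases hjt : j = t
            · omega
            · exact absurd (hit ▸ hij).symm (hfresh j (by omega))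
            · exact absurd (hjt ▸ hij) (hfresh i (by omega))
            · exact hinj i j (by omega) (by omega) hij)
          (by
            intro v w
            rw [PySem.Dict.get?_insert]
            split_ifs with hv
            · constructor
              · rintro ⟨rfl⟩
                exact ⟨t, by omega, rfl, hv.symm⟩
              · rintro ⟨j, hj, rfl, hcv⟩
                have : j = t := by
                  by_contra hne
                  exact hfresh j (by omega) (by rw [hcv, hv])
                simp [this]
            · rw [hspec]
              constructor
              · rintro ⟨j, hj, rfl, hcv⟩
                exact ⟨j, by omega, rfl, hcv⟩
              · rintro ⟨j, hj, rfl, hcv⟩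
                have hjt : j ≠ t := by rintro rfl; exact hv hcv.symm
                exact ⟨j, by omega, rfl, hcv⟩)
        rw [this, show t + 1 + r = t + (r + 1) by omega]
    | some w =>
        dsimp only
        obtain ⟨s, hst, rfl, hcs⟩ := (hspec _ _).mp hg
        have hp : 0 < t - s := by omega
        -- cycle = table[s:]
        rw [PySem.List.slice_from _ (by exact_mod_cast Int.natCast_nonneg s)]
        rw [show ((s : Int)).toNat = s from Int.toNat_natCast s]
        rw [pv_drop x m s t (by omega)]
        set cy := (List.range (t - s)).map (fun j => pvC x m (s + j)) with hcy
        have hlen : cy.length = t - s := by simp [hcy]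
        -- need // len(cycle) + 1 as a Nat
        have hdiv : PySem.Int.floordiv ((r : Int) + 1) (cy.length : Int) + 1
            = (((r + 1) / (t - s) + 1 : Nat) : Int) := by
          rw [hlen]
          push_cast
          rw [show ((r : Int) + 1) = ((r + 1 : Nat) : Int) by push_cast; ring]
          rw [PySem.Int.floordiv_natCast]
          push_cast
          ring
        rw [hdiv]
        -- the tail equals the next r+1 chain entries
        have htail : PySem.List.slice
            (PySem.List.pyRepeat cy (((r + 1) / (t - s) + 1 : Nat) : Int)) none (some ((r : Int) + 1))
            = (List.range (r + 1)).map (fun j => pvC x m (t + j)) := by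
          rw [show ((r : Int) + 1) = ((r + 1 : Nat) : Int) by push_cast; ring]
          rw [PySem.List.slice_to_natCast]
          unfold PySem.List.pyRepeat
          rw [Int.toNat_natCast]
          rw [pv_tile cy (by omega) _]
          rw [hlen]
          have hle : r + 1 ≤ ((r + 1) / (t - s) + 1) * (t - s) := by
            have := Nat.div_add_mod (r + 1) (t - s)
            have := Nat.mod_lt (r + 1) hp
            nlinarith
          rw [← List.map_take, List.take_range, Nat.min_eq_left hle]
          apply List.map_congr_left
          intro j hj
          have hjp : j % (t - s) < t - s := Nat.mod_lt j hp
          have : cy.getD (j % (t - s)) 0 = pvC x m (s + j % (t - s)) := by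
            rw [hcy, List.getD_eq_getElem _ _ (by simpa [hlen] using hjp)]
            simp
          rw [this, ← pv_reduce x m hm s t (by omega) hcs j]
        rw [htail]
        -- table ++ next entries = longer prefix
        simp only [pvT, List.range_add, List.map_append, List.map_map]
        rfl

-- ===== VERDICT (by name: the statement is the Claim_ definition above) =====
theorem successive_squares_spec : Claim_equal_successive_squares := by
  intro base m length _ hm
  unfold Spec_successive_squares successive_squares successive_squares_alt
  dsimp only
  rw [PySem.List.pyRange_one]
  set n := (length - 1).toNat with hn
  rw [List.foldl_map]
  rw [pv_loop base m hm n, List.reverse_reverse]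
  have hfirst : PySem.Int.mod base m = pvC base m 0 := by
    unfold pvC; norm_num
  have hAside : PySem.Int.mod base m ::
      (List.range n).map (fun k => PySem.Int.mod (base ^ (2 ^ (k + 1))) m) = pvT base m (1 + n) := by
    rw [show 1 + n = n + 1 by omega]
    simp only [pvT, List.range_succ_eq_map, List.map_cons, List.map_map]
    rw [hfirst]
    rfl
  rw [hAside, hfirst]
  have hinit : [pvC base m 0] = pvT base m 1 := by simp [pvT]
  rw [hinit]
  rw [pv_loopB base m hm n 1 _ (by omega)
    (by intro i j hi hj _; omega)
    (by
      intro v w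
      rw [PySem.Dict.get?_insert]
      split_ifs with hv
      · constructor
        · rintro ⟨rfl⟩; exact ⟨0, by omega, rfl, hv.symm⟩
        · rintro ⟨j, hj, rfl, hcv⟩
          have : j = 0 := by omega
          simp [this]
      · rw [PySem.Dict.get?_empty]
        constructor
        · rintro ⟨⟩
        · rintro ⟨j, hj, rfl, hcv⟩
          have : j = 0 := by omega
          exact absurd hcv.symm (by simpa [this] using hv))]
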